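-- pv_equiv track=rewrite | github.com/AlanKev117/algorithms | decibinary/my_db.py | decimal_of
-- ===== SOURCE A (Python) =====
-- def decimal_of(x):
--     decimal = 0
--     x_c = x
--     i = 0
--     while x_c > 0:
--         decimal += (x_c % 10) * (1 << i)
--         x_c //= 10
--         i += 1
--     return decimal
-- ===== SOURCE B (Python) =====
-- def decimal_of(x):
--     # Horner's rule on the decimal digits, most-significant first:
--     # value(x) = 2 * value(x // 10) + x % 10, no powers of two, no counter.
--     if x <= 0:
--         return 0
--     return decimal_of(x // 10) * 2 + x % 10
-- ===== Notes on version B (the rewrite author's own statement) =====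
-- stated objective: simpler
-- what changed: Replaced the iterative LSB-first loop that accumulates digit*(1<<i) with explicit shift-counter state by a two-line Horner-style recursion (result = 2*rec(x//10) + x%10) that carries no counter and computes no powers of two.
import Mathlib
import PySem

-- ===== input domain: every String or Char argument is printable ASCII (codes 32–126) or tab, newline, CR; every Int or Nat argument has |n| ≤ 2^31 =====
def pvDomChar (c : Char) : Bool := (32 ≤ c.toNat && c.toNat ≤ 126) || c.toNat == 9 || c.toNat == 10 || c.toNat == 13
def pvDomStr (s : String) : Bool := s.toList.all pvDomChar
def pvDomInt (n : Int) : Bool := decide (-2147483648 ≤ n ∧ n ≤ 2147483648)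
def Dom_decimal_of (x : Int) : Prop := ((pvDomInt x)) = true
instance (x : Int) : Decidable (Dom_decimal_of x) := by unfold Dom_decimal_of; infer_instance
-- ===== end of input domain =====

-- B replaces A's LSB-first loop (digit * (1 << i) with a shift counter) by a
-- Horner-style recursion with no counter and no powers of two; objective: simpler.

-- termination helper, cited by both ports' decreasing_by
theorem pv_fdiv10_lt (x : Int) (h : 0 < x) : (PySem.Int.floordiv x 10).toNat < x.toNat := by
  have : x.fdiv 10 = x / 10 := by
    rw [Int.fdiv_eq_ediv]; simp
  simp only [PySem.Int.floordiv, this]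
  omega

-- ===== PORT A =====
def decimal_of_loop (x_c : Int) (i : Nat) (decimal : Int) : Int :=
  if 0 < x_c then
    decimal_of_loop (PySem.Int.floordiv x_c 10) (i + 1)
      (decimal + PySem.Int.mod x_c 10 * ((1 : Int) <<< i))
  else decimal
termination_by x_c.toNat
decreasing_by exact pv_fdiv10_lt _ (by assumption)

def decimal_of (x : Int) : Int := decimal_of_loop x 0 0

-- ===== PORT B =====
def decimal_of_alt (x : Int) : Int :=
  if 0 < x then
    decimal_of_alt (PySem.Int.floordiv x 10) * 2 + PySem.Int.mod x 10
  else 0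
termination_by x.toNat
decreasing_by exact pv_fdiv10_lt _ (by assumption)

-- ===== PRECONDITION & SPEC =====
def Spec_decimal_of (x : Int) (out : Int) : Prop := out = decimal_of_alt x
instance (x : Int) (out : Int) : Decidable (Spec_decimal_of x out) := by unfold Spec_decimal_of; infer_instance

-- ===== CLAIM (what is proved, stated in full; the proofs are below) =====
def Claim_equal_decimal_of : Prop := ∀ (x : Int), Dom_decimal_of x → Spec_decimal_of x (decimal_of x)

-- ===== LEMMAS AND PROOFS =====

-- loop invariant: A's loop adds 2^i times B's value
theorem decimal_of_loop_eq (n : Nat) : ∀ (x : Int), x.toNat = n → ∀ (i : Nat) (d : Int),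
    decimal_of_loop x i d = d + decimal_of_alt x * ((1 : Int) <<< i) := by
  induction n using Nat.strong_induction_on with
  | _ n ih =>
    intro x hx i d
    rw [decimal_of_loop, decimal_of_alt]
    by_cases h : 0 < x
    · simp only [h, if_pos]
      rw [ih (PySem.Int.floordiv x 10).toNat (by rw [← hx]; exact pv_fdiv10_lt x h) _ rfl]
      have h1 : ((1 : Int) <<< (i + 1)) = ((1 : Int) <<< i) * 2 := by
        simp [Int.shiftLeft_eq, pow_succ]
      rw [h1]; ring
    · simp [h]

-- ===== VERDICT (by name: the statement is the Claim_ definition above) =====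
theorem decimal_of_spec : Claim_equal_decimal_of := by
  intro x _
  unfold Spec_decimal_of decimal_of
  rw [decimal_of_loop_eq x.toNat x rfl 0 0]
  simp
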